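-- pv_equiv track=rewrite | github.com/csdwp/co-sie-dzieje-w-polsce | backend/app/services/votes_service.py | collect_votes_by_party
-- ===== SOURCE A (Python) =====
-- from collections import defaultdict
-- from typing import Any, Dict, List
--
-- def collect_votes_by_party(votes: List[Dict[str, Any]]) -> Dict[str, Dict[str, int]]:
--     party_votes: Dict[str, Dict[str, int]] = defaultdict(
--         lambda: {"yes": 0, "no": 0, "abstain": 0, "absent": 0, "total": 0}
--     )
--
--     for vote in votes:
--         club = vote.get("club")
--         vote_type = vote.get("vote")
--
--         if not club:
--             continue
--
--         party_votes[club]["total"] += 1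
--
--         if vote_type == "YES":
--             party_votes[club]["yes"] += 1
--         elif vote_type == "NO":
--             party_votes[club]["no"] += 1
--         elif vote_type == "ABSTAIN":
--             party_votes[club]["abstain"] += 1
--         else:
--             party_votes[club]["absent"] += 1
--
--     return party_votes
-- ===== SOURCE B (Python) =====
-- from collections import defaultdict
-- from typing import Any, Dict, List
--
--
-- def collect_votes_by_party(votes: List[Dict[str, Any]]) -> Dict[str, Dict[str, int]]:
--     # Pass 1: group the vote types by club (first-appearance order), skipping falsy clubs.
--     groups: Dict[str, list] = {}
--     for vote in votes:
--         club = vote.get("club")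
--         if not club:
--             continue
--         groups.setdefault(club, []).append(vote.get("vote"))
--
--     # Pass 2: compute each row arithmetically from the group.
--     party_votes: Dict[str, Dict[str, int]] = defaultdict(
--         lambda: {"yes": 0, "no": 0, "abstain": 0, "absent": 0, "total": 0}
--     )
--     for club, vs in groups.items():
--         total = len(vs)
--         yes = vs.count("YES")
--         no = vs.count("NO")
--         abstain = vs.count("ABSTAIN")
--         party_votes[club] = {
--             "yes": yes,
--             "no": no,
--             "abstain": abstain,
--             "absent": total - yes - no - abstain,
--             "total": total,
--         }
--     return party_votes
-- ===== Notes on version B (the rewrite author's own statement) =====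
-- stated objective: alternative
-- what changed: B replaces A's per-vote if/elif increments into a defaultdict of counter rows by a two-phase decomposition: first group vote types by club into plain lists, then compute each row arithmetically (total = group length, yes/no/abstain by counting literals, absent by subtraction).
import Mathlib
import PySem

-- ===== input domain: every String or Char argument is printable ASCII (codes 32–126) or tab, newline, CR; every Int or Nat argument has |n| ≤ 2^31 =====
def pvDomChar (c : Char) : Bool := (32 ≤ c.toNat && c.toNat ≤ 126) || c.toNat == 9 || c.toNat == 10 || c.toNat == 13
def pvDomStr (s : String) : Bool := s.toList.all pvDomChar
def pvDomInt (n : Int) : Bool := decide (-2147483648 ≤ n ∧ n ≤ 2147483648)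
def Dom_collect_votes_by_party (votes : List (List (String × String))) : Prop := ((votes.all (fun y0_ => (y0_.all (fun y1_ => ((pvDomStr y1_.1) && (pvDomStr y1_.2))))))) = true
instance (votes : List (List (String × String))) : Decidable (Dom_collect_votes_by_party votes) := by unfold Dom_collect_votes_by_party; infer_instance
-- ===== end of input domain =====

-- B restructures A's single per-vote if/elif loop into two phases — group vote types by club,
-- then compute each row arithmetically (counts + subtraction for "absent"); alternative, same cost.


-- ===== PORT A =====
-- defaultdict factory: {"yes": 0, "no": 0, "abstain": 0, "absent": 0, "total": 0}
def pvDefaultRow : PySem.Dict String Int :=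
  PySem.Dict.mk [("yes", 0), ("no", 0), ("abstain", 0), ("absent", 0), ("total", 0)]

def collect_votes_by_party (votes : List (List (String × String))) : List (String × List (String × Int)) :=
  let party_votes := votes.foldl (fun d vote =>
    let club := (PySem.Dict.mk vote).get? "club"
    let vote_type := (PySem.Dict.mk vote).get? "vote"
    match club with
    | none => d                                  -- "if not club: continue"
    | some c =>
      if c = "" then d                           -- "" is falsy too
      else
        let row := d.getD c pvDefaultRow         -- defaultdict access
        let row := row.modify "total" 0 (· + 1)
        let row :=
          if vote_type = some "YES" then row.modify "yes" 0 (· + 1)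
          else if vote_type = some "NO" then row.modify "no" 0 (· + 1)
          else if vote_type = some "ABSTAIN" then row.modify "abstain" 0 (· + 1)
          else row.modify "absent" 0 (· + 1)
        d.insert c row) PySem.Dict.empty
  party_votes.items.map (fun p => (p.1, p.2.items))

-- ===== PORT B =====
def collect_votes_by_party_alt (votes : List (List (String × String))) : List (String × List (String × Int)) :=
  let groups := votes.foldl (fun g vote =>
    let club := (PySem.Dict.mk vote).get? "club"
    match club with
    | none => g
    | some c =>
      if c = "" then g
      else g.modify c [] (· ++ [(PySem.Dict.mk vote).get? "vote"])) PySem.Dict.empty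
  groups.items.map (fun p =>
    let total : Int := p.2.length
    let yes : Int := p.2.count (some "YES")
    let no : Int := p.2.count (some "NO")
    let abstain : Int := p.2.count (some "ABSTAIN")
    (p.1, [("yes", yes), ("no", no), ("abstain", abstain),
           ("absent", total - yes - no - abstain), ("total", total)]))

-- ===== PRECONDITION & SPEC =====
def Spec_collect_votes_by_party (votes : List (List (String × String))) (out : List (String × List (String × Int))) : Prop := out = collect_votes_by_party_alt votes
instance (votes : List (List (String × String))) (out : List (String × List (String × Int))) : Decidable (Spec_collect_votes_by_party votes out) := by unfold Spec_collect_votes_by_party; infer_instance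

-- ===== CLAIM (what is proved, stated in full; the proofs are below) =====
def Claim_equal_collect_votes_by_party : Prop := ∀ (votes : List (List (String × String))), Dom_collect_votes_by_party votes → Spec_collect_votes_by_party votes (collect_votes_by_party votes)

-- ===== LEMMAS AND PROOFS =====

-- the (club, vote-type) pair a vote contributes, none if the club is falsy
def pvKeyVal (vote : List (String × String)) : Option (String × Option String) :=
  match (PySem.Dict.mk vote).get? "club" with
  | none => none
  | some c => if c = "" then none else some (c, (PySem.Dict.mk vote).get? "vote")

-- A's inner-dict update for one vote of type v
def pvUpdRow (r : PySem.Dict String Int) (v : Option String) : PySem.Dict String Int :=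
  let r := r.modify "total" 0 (· + 1)
  if v = some "YES" then r.modify "yes" 0 (· + 1)
  else if v = some "NO" then r.modify "no" 0 (· + 1)
  else if v = some "ABSTAIN" then r.modify "abstain" 0 (· + 1)
  else r.modify "absent" 0 (· + 1)

-- the row as B computes it, as an items list
def pvRowList (vs : List (Option String)) : List (String × Int) :=
  [("yes", (vs.count (some "YES") : Int)), ("no", (vs.count (some "NO") : Int)),
   ("abstain", (vs.count (some "ABSTAIN") : Int)),
   ("absent", (vs.length : Int) - vs.count (some "YES") - vs.count (some "NO") - vs.count (some "ABSTAIN")),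
   ("total", (vs.length : Int))]

lemma pvA_fold_eq (votes : List (List (String × String))) (d : PySem.Dict String (PySem.Dict String Int)) :
    votes.foldl (fun d vote =>
      let club := (PySem.Dict.mk vote).get? "club"
      let vote_type := (PySem.Dict.mk vote).get? "vote"
      match club with
      | none => d
      | some c =>
        if c = "" then d
        else
          let row := d.getD c pvDefaultRow
          let row := row.modify "total" 0 (· + 1)
          let row :=
            if vote_type = some "YES" then row.modify "yes" 0 (· + 1)
            else if vote_type = some "NO" then row.modify "no" 0 (· + 1)
            else if vote_type = some "ABSTAIN" then row.modify "abstain" 0 (· + 1)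
            else row.modify "absent" 0 (· + 1)
          d.insert c row) d
    = (votes.filterMap pvKeyVal).foldl
        (fun d p => d.insert p.1 (pvUpdRow (d.getD p.1 pvDefaultRow) p.2)) d := by
  induction votes generalizing d with
  | nil => rfl
  | cons vote rest ih =>
    simp only [List.foldl_cons, List.filterMap_cons, pvKeyVal]
    cases h : (PySem.Dict.mk vote).get? "club" with
    | none => exact ih d
    | some c =>
      by_cases hc : c = ""
      · simp only [hc, reduceIte]
        exact ih d
      · simp only [if_neg hc, List.foldl_cons]
        exact ih _

lemma pvB_fold_eq (votes : List (List (String × String))) (g : PySem.Dict String (List (Option String))) :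
    votes.foldl (fun g vote =>
      let club := (PySem.Dict.mk vote).get? "club"
      match club with
      | none => g
      | some c =>
        if c = "" then g
        else g.modify c [] (· ++ [(PySem.Dict.mk vote).get? "vote"])) g
    = (votes.filterMap pvKeyVal).foldl
        (fun g p => g.modify p.1 [] (· ++ [p.2])) g := by
  induction votes generalizing g with
  | nil => rfl
  | cons vote rest ih =>
    simp only [List.foldl_cons, List.filterMap_cons, pvKeyVal]
    cases h : (PySem.Dict.mk vote).get? "club" with
    | none => exact ih g
    | some c =>
      by_cases hc : c = ""
      · simp only [hc, reduceIte]
        exact ih g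
      · simp only [if_neg hc, List.foldl_cons]
        exact ih _

lemma pvRow_step (vs : List (Option String)) (v : Option String) :
    PySem.Dict.mk (pvRowList (vs ++ [v])) = pvUpdRow (PySem.Dict.mk (pvRowList vs)) v := by
  by_cases h1 : v = some "YES"
  · simp [pvRowList, pvUpdRow, h1, PySem.Dict.modify, PySem.Dict.getD, PySem.Dict.get?,
      PySem.Dict.insert, PySem.Dict.contains, List.count_append]
  · by_cases h2 : v = some "NO"
    · simp [pvRowList, pvUpdRow, h2, PySem.Dict.modify, PySem.Dict.getD, PySem.Dict.get?,
        PySem.Dict.insert, PySem.Dict.contains, List.count_append]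
      omega
    · by_cases h3 : v = some "ABSTAIN"
      · simp [pvRowList, pvUpdRow, h3, PySem.Dict.modify, PySem.Dict.getD, PySem.Dict.get?,
          PySem.Dict.insert, PySem.Dict.contains, List.count_append]
        omega
      · simp [pvRowList, pvUpdRow, h1, h2, h3, PySem.Dict.modify, PySem.Dict.getD, PySem.Dict.get?,
          PySem.Dict.insert, PySem.Dict.contains, List.count_append]
        omega

lemma pvRow_core (vs : List (Option String)) :
    vs.foldl pvUpdRow pvDefaultRow = PySem.Dict.mk (pvRowList vs) := by
  induction vs using List.reverseRecOn with
  | nil => rfl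
  | append_singleton vs v ih =>
    rw [List.foldl_append, List.foldl_cons, List.foldl_nil, ih, pvRow_step]

lemma pvA_getD (pairs : List (String × Option String)) (d : PySem.Dict String (PySem.Dict String Int)) (k : String) :
    (pairs.foldl (fun d p => d.insert p.1 (pvUpdRow (d.getD p.1 pvDefaultRow) p.2)) d).getD k pvDefaultRow
    = ((pairs.filter (fun p => p.1 == k)).map (·.2)).foldl pvUpdRow (d.getD k pvDefaultRow) := by
  induction pairs generalizing d with
  | nil => rfl
  | cons p rest ih =>
    simp only [List.foldl_cons, List.filter_cons]
    by_cases hk : p.1 = k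
    · simp [hk, ih]
    · have hbe : (p.1 == k) = false := by simp [hk]
      simp [hbe, ih, PySem.Dict.getD_insert, Ne.symm hk]

-- ===== VERDICT (by name: the statement is the Claim_ definition above) =====
theorem collect_votes_by_party_spec : Claim_equal_collect_votes_by_party := by
  intro votes _
  unfold Spec_collect_votes_by_party collect_votes_by_party collect_votes_by_party_alt
  simp only [pvA_fold_eq, pvB_fold_eq]
  set pairs := votes.filterMap pvKeyVal with hp
  set dA := pairs.foldl (fun d p => d.insert p.1 (pvUpdRow (d.getD p.1 pvDefaultRow) p.2)) PySem.Dict.empty with hdA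
  set dB := pairs.foldl (fun g p => g.modify p.1 [] (· ++ [p.2])) PySem.Dict.empty with hdB
  have hndA : dA.keys.Nodup := by
    rw [hdA]
    exact PySem.Dict.nodup_keys_foldl_insert_key pairs (fun p => p.1) _ _ (by simp)
  have hndB : dB.keys.Nodup := by
    rw [hdB]
    exact PySem.Dict.nodup_keys_foldl_modify_key pairs (fun p => p.1) _ _ _ (by simp)
  have hkeys : dA.keys = dB.keys := by
    rw [hdA, hdB, PySem.Dict.keys_foldl_insert_key, PySem.Dict.keys_foldl_modify_key]
    simp [PySem.Dict.keys_empty]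
  rw [PySem.Dict.items_eq_map_keys dA hndA pvDefaultRow,
      PySem.Dict.items_eq_map_keys dB hndB ([] : List (Option String)),
      List.map_map, List.map_map, hkeys]
  apply List.map_congr_left
  intro k hk
  have hB : dB.getD k [] = (pairs.filter (fun p => p.1 == k)).map (·.2) := by
    rw [hdB, PySem.Dict.getD_foldl_modify_append]
    simp
  have hA : dA.getD k pvDefaultRow
      = PySem.Dict.mk (pvRowList ((pairs.filter (fun p => p.1 == k)).map (·.2))) := by
    rw [hdA, pvA_getD]
    simpa using pvRow_core ((pairs.filter (fun p => p.1 == k)).map (·.2))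
  simp [Function.comp, hA, hB, pvRowList]
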